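-- pv_equiv track=rewrite | github.com/Ron-Madan/Portfolio | File Organizer/file_organizer.py | digit_count
-- ===== SOURCE A (Python) =====
-- def digit_count(s):
--     c = 0
--     nums = ["0","1","2","3","4","5","6","7","8","9"]
--     for i in s:
--         if i in nums:
--             c += 1
--         else:
--             return 0
--     return c
-- ===== SOURCE B (Python) =====
-- def digit_count(s):
--     if s.strip("0123456789"):
--         return 0
--     return len(s)
-- ===== Notes on version B (the rewrite author's own statement) =====
-- stated objective: simpler
-- what changed: Replaced the character-counting loop with early return by a library call: strip all ASCII digits from both ends and branch on whether anything survives (a leftover char means a non-digit exists, giving 0), else return len(s); no counter and no explicit scan remain.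
import Mathlib
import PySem

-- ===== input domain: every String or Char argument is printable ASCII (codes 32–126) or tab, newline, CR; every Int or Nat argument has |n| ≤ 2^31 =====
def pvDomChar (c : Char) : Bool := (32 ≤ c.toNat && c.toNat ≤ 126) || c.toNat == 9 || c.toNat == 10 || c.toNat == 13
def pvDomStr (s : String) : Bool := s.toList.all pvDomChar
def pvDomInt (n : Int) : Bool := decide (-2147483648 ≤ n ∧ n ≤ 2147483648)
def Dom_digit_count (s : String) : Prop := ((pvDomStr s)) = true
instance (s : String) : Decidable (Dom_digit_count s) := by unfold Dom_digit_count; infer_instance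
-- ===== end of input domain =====

-- B strips all ASCII digits from both ends and branches on whether anything survives, instead of A's counter loop with early return; objective: simpler.

-- ===== PORT A =====
-- A iterates chars, incrementing c while the char is in the digit list, returning 0 early otherwise.
def digitCountNums : List Char := ['0','1','2','3','4','5','6','7','8','9']

def digitCountLoop : List Char → Int → Int
  | [], c => c
  | i :: rest, c => if digitCountNums.contains i then digitCountLoop rest (c + 1) else 0

def digit_count (s : String) : Int := digitCountLoop s.toList 0

-- ===== PORT B =====
-- B: if s.strip("0123456789") is non-empty (truthy) return 0, else len(s).
def digit_count_alt (s : String) : Int :=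
  if PySem.Str.len (PySem.Str.stripChars s "0123456789") ≠ 0 then 0
  else PySem.Str.len s

-- ===== PRECONDITION & SPEC =====
def Spec_digit_count (s : String) (out : Int) : Prop := out = digit_count_alt s
instance (s : String) (out : Int) : Decidable (Spec_digit_count s out) := by unfold Spec_digit_count; infer_instance

-- ===== CLAIM (what is proved, stated in full; the proofs are below) =====
def Claim_equal_digit_count : Prop := ∀ (s : String), Dom_digit_count s → Spec_digit_count s (digit_count s)

-- ===== LEMMAS AND PROOFS =====
theorem digitCountLoop_eq (l : List Char) (c : Int) :
    digitCountLoop l c =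
      if l.all (fun ch => digitCountNums.contains ch) then c + l.length else 0 := by
  induction l generalizing c with
  | nil => simp [digitCountLoop]
  | cons i rest ih =>
    by_cases h : i ∈ digitCountNums
    · simp only [digitCountLoop, List.contains_eq_mem, h, decide_true, if_true, List.all_cons, Bool.true_and, ih]
      split_ifs <;> simp; ring
    · simp [digitCountLoop, h]

theorem stripChars_nil_iff (l chars : List Char) :
    PySem.Chars.stripChars l chars = [] ↔ l.all (fun ch => chars.contains ch) := by
  unfold PySem.Chars.stripChars
  constructor
  · intro h
    have h1 : List.dropWhile (fun c => chars.contains c) (List.dropWhile (fun c => chars.contains c) l).reverse = [] := by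
      simpa using congrArg List.reverse h
    have h2 : ∀ x ∈ (List.dropWhile (fun c => chars.contains c) l).reverse, (fun c => chars.contains c) x = true :=
      (List.dropWhile_eq_nil_iff).mp h1
    have h3 : (List.dropWhile (fun c => chars.contains c) l).all (fun c => chars.contains c) := by
      rw [List.all_eq_true]; intro x hx; exact h2 x (List.mem_reverse.mpr hx)
    rw [List.all_eq_true]
    intro x hx
    rcases (List.mem_append.mp (by
      rw [List.takeWhile_append_dropWhile (p := fun c => chars.contains c)]; exact hx)) with hT | hD
    · exact List.mem_takeWhile_imp hT
    · exact (List.all_eq_true.mp h3) x hD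
  · intro h
    have hall : ∀ x ∈ l, x ∈ chars := by
      intro x hx
      simpa using (List.all_eq_true.mp h) x hx
    have h0 : List.dropWhile (fun c => chars.contains c) l = [] :=
      (List.dropWhile_eq_nil_iff).mpr (fun x hx => by simpa using hall x hx)
    show (List.dropWhile (fun c => chars.contains c)
        (List.dropWhile (fun c => chars.contains c) l).reverse).reverse = []
    rw [h0]
    simp

theorem digit_count_alt_eq (s : String) :
    digit_count_alt s =
      if s.toList.all (fun ch => digitCountNums.contains ch) then (s.toList.length : Int) else 0 := by
  unfold digit_count_alt
  have hb : ("0123456789" : String).toList = digitCountNums := by decide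
  have hiff := stripChars_nil_iff s.toList ("0123456789" : String).toList
  rw [hb] at hiff
  by_cases h : s.toList.all (fun ch => digitCountNums.contains ch)
  · have hnil : PySem.Chars.stripChars s.toList digitCountNums = [] := hiff.mpr h
    have hstrip : (PySem.Str.stripChars s "0123456789").toList = [] := by
      rw [PySem.Str.toList_stripChars, hb]; exact hnil
    simp [PySem.Str.len_eq, hstrip]
    intro x hx hnx
    exact absurd (by simpa using (List.all_eq_true.mp h) x hx) hnx
  · have hne : PySem.Chars.stripChars s.toList digitCountNums ≠ [] :=
      fun hc => h (hiff.mp hc)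
    have hlen : (PySem.Str.stripChars s "0123456789").toList.length ≠ 0 := by
      rw [PySem.Str.toList_stripChars, hb]
      exact fun hc => hne (List.length_eq_zero_iff.mp hc)
    simp [PySem.Str.len_eq]
    have hmem : ¬ ∀ x ∈ s.toList, x ∈ digitCountNums :=
      fun hc => h (by simpa [List.all_eq_true] using hc)
    rw [if_neg (show ¬ PySem.Chars.stripChars s.toList ['0','1','2','3','4','5','6','7','8','9'] = [] from hne),
      if_neg hmem]

-- ===== VERDICT (by name: the statement is the Claim_ definition above) =====
theorem digit_count_spec : Claim_equal_digit_count := by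
  intro s _
  unfold Spec_digit_count digit_count
  rw [digitCountLoop_eq, digit_count_alt_eq]
  split_ifs <;> simp
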